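-- pv_equiv track=rewrite | github.com/bhzadjnty7/Advanced-Algorithms-UT | AA_HW6/Max_Covearge.py | max_coverage
-- ===== SOURCE A (Python) =====
-- def max_coverage(towers, users, k):
--     """
--     towers: list of sets, each representing users covered by a tower
--     users: set of all users
--     k: number of towers we can select
--     """
--     selected_towers = []  # Selected towers
--     covered_users = set()  # Covered users
--
--     for _ in range(k):
--         # Find the tower that covers the most new users
--         max_additional_coverage = 0
--         best_tower = None
--
--         for i, tower in enumerate(towers):
--             if i not in selected_towers:
--                 # Calculate the number of new users this tower covers
--                 new_coverage = len(tower - covered_users)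
--                 if new_coverage > max_additional_coverage:
--                     max_additional_coverage = new_coverage
--                     best_tower = i
--
--         # If a tower was found that covers new users
--         if best_tower is not None:
--             selected_towers.append(best_tower)
--             covered_users = covered_users.union(towers[best_tower])
--
--     return selected_towers, covered_users
-- ===== SOURCE B (Python) =====
-- def max_coverage(towers, users, k):
--     # Greedy with shrinking towers: keep each unselected tower's still-uncovered
--     # users and delete a tower once selected, so no per-round set difference
--     # against the covered set is recomputed and the loop stops early.
--     rem = list(enumerate(towers))
--     selected = []
--     covered = set()
--     n = k
--     while n > 0:
--         best = None
--         for i, t in rem: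
--             if len(t) > 0 and (best is None or len(t) > len(best[1])):
--                 best = (i, t)
--         if best is None:
--             break
--         bi, bt = best
--         selected.append(bi)
--         covered |= bt
--         rem = [(i, t - bt) for i, t in rem if i != bi]
--         n -= 1
--     return selected, covered
-- ===== Notes on version B (the rewrite author's own statement) =====
-- stated objective: faster
-- what changed: Instead of rescanning every tower against the growing covered set on each of the k rounds, B keeps each unselected tower's still-uncovered users, deletes a tower once selected, shrinks the rest by the newly covered users, and stops as soon as no tower adds coverage.
import Mathlib
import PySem

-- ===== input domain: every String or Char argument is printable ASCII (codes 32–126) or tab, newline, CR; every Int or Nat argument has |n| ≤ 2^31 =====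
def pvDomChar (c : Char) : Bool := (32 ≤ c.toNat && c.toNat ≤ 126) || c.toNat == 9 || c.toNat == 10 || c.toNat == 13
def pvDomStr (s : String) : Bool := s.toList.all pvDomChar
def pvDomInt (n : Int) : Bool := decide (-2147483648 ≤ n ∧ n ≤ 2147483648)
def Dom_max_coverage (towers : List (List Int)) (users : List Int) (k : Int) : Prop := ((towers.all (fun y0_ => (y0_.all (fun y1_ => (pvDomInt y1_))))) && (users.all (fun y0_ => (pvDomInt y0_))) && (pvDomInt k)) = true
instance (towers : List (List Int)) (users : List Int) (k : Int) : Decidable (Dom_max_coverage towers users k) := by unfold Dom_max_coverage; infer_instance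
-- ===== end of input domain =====

-- B replaces A's k rescans of every tower against the growing covered set by shrinking the
-- unselected towers in place and deleting selected ones, stopping as soon as no tower adds users.

-- ===== PORT A =====
-- inner loop of A: scan enumerate(towers), skip already-selected indices, keep the first
-- strict maximum of len(tower - covered); state = (max_additional_coverage, best_tower)
def aBest (sel cov : List Int) (towers : List (List Int)) : Int × Option Int :=
  (PySem.List.enumerate towers).foldl
    (fun (st : Int × Option Int) p =>
      if sel.contains p.1 = false then
        if ((PySem.Set.diff p.2 cov).length : Int) > st.1 then
          (((PySem.Set.diff p.2 cov).length : Int), some p.1)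
        else st
      else st)
    (0, none)

def max_coverage (towers : List (List Int)) (users : List Int) (k : Int) : List Int × List Int :=
  (PySem.List.pyRange 0 k 1).foldl
    (fun (st : List Int × List Int) _ =>
      match (aBest st.1 st.2 towers).2 with
      | some b => (st.1 ++ [b], PySem.Set.union st.2 (PySem.List.pyGetD towers b []))
      | none => st)
    ([], [])

-- ===== PORT B =====
-- best remaining tower: first (index order) tower of maximal remaining size, if that size > 0
def bCond (best : Option (Int × List Int)) (p : Int × List Int) : Bool :=
  decide (0 < p.2.length) && (match best with | none => true | some q => decide (q.2.length < p.2.length))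

def bBest (rem : List (Int × List Int)) : Option (Int × List Int) :=
  rem.foldl (fun (best : Option (Int × List Int)) p => if bCond best p then some p else best) none

-- rem after selecting tower bi with remaining users bt: drop bi, subtract bt everywhere
def bShrink (rem : List (Int × List Int)) (bi : Int) (bt : List Int) : List (Int × List Int) :=
  (rem.filter (fun p => p.1 != bi)).map (fun p => (p.1, PySem.Set.diff p.2 bt))

theorem bShrink_length_lt {rem : List (Int × List Int)} {q : Int × List Int}
    (h : q ∈ rem) : (bShrink rem q.1 q.2).length < rem.length := by
  have : (rem.filter (fun p => p.1 != q.1)).length < rem.length := by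
    rw [List.length_filter_lt_length_iff_exists]
    exact ⟨q, h, by simp⟩
  simpa [bShrink] using this

theorem bBest_mem_aux (l : List (Int × List Int)) (acc : Option (Int × List Int))
    (q : Int × List Int)
    (h : l.foldl (fun (best : Option (Int × List Int)) p => if bCond best p then some p else best) acc = some q) :
    q ∈ l ∨ acc = some q := by
  induction l generalizing acc with
  | nil => exact Or.inr h
  | cons x t ih =>
    simp only [List.foldl_cons] at h
    rcases ih _ h with hm | he
    · exact Or.inl (List.mem_cons_of_mem _ hm)
    · by_cases hc : bCond acc x = true
      · rw [if_pos hc] at he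
        exact Or.inl (by simp only [Option.some.injEq] at he; simp [he])
      · rw [if_neg hc] at he
        exact Or.inr he

theorem bBest_mem {rem : List (Int × List Int)} {q : Int × List Int}
    (h : bBest rem = some q) : q ∈ rem := by
  rcases bBest_mem_aux rem none q h with hm | he
  · exact hm
  · cases he

def bGo (rem : List (Int × List Int)) (sel cov : List Int) (n : Int) : List Int × List Int :=
  if 0 < n then
    match h : bBest rem with
    | none => (sel, cov)
    | some q => bGo (bShrink rem q.1 q.2) (sel ++ [q.1]) (PySem.Set.union cov q.2) (n - 1)
  else (sel, cov)
termination_by rem.length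
decreasing_by exact bShrink_length_lt (bBest_mem h)

def max_coverage_alt (towers : List (List Int)) (users : List Int) (k : Int) : List Int × List Int :=
  bGo (PySem.List.enumerate towers) [] [] k

-- ===== PRECONDITION & SPEC =====
def Spec_max_coverage (towers : List (List Int)) (users : List Int) (k : Int) (out : List Int × List Int) : Prop := out = max_coverage_alt towers users k
instance (towers : List (List Int)) (users : List Int) (k : Int) (out : List Int × List Int) : Decidable (Spec_max_coverage towers users k out) := by unfold Spec_max_coverage; infer_instance

-- ===== CLAIM (what is proved, stated in full; the proofs are below) =====
def Claim_equal_max_coverage : Prop := ∀ (towers : List (List Int)) (users : List Int) (k : Int), Dom_max_coverage towers users k → Spec_max_coverage towers users k (max_coverage towers users k)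

-- ===== LEMMAS AND PROOFS =====

-- B's remaining-towers list, expressed from A's state (sel, cov)
def remOf (towers : List (List Int)) (sel cov : List Int) : List (Int × List Int) :=
  ((PySem.List.enumerate towers).filter (fun p => sel.contains p.1 = false)).map
    (fun p => (p.1, PySem.Set.diff p.2 cov))

-- one round of A, as a state transformer (the range element is ignored by A's loop body)
def aStep (towers : List (List Int)) (st : List Int × List Int) : List Int × List Int :=
  match (aBest st.1 st.2 towers).2 with
  | some b => (st.1 ++ [b], PySem.Set.union st.2 (PySem.List.pyGetD towers b []))
  | none => st

def aIter (towers : List (List Int)) : Nat → (List Int × List Int) → List Int × List Int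
  | 0, st => st
  | m + 1, st => aIter towers m (aStep towers st)

theorem foldl_const_eq_aIter (towers : List (List Int)) (l : List Int) (st : List Int × List Int) :
    l.foldl (fun st _ => aStep towers st) st = aIter towers l.length st := by
  induction l generalizing st with
  | nil => rfl
  | cons x t ih => simp [List.foldl_cons, aIter, ih]

theorem length_pyRange_zero (k : Int) : (PySem.List.pyRange 0 k 1).length = k.toNat := by
  simp only [PySem.List.pyRange]
  split_ifs with h1 h2 <;> simp_all <;> omega

-- the inner scans agree: A's (max, best) is determined by B's best over remOf
def stepA (sel cov : List Int) (st : Int × Option Int) (p : Int × List Int) : Int × Option Int :=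
  if sel.contains p.1 = false then
    if ((PySem.Set.diff p.2 cov).length : Int) > st.1 then
      (((PySem.Set.diff p.2 cov).length : Int), some p.1)
    else st
  else st

def stepB (sel cov : List Int) (best : Option (Int × List Int)) (p : Int × List Int) :
    Option (Int × List Int) :=
  if sel.contains p.1 = false then
    (if bCond best (p.1, PySem.Set.diff p.2 cov) then some (p.1, PySem.Set.diff p.2 cov) else best)
  else best

def bVal : Option (Int × List Int) → Int
  | none => 0
  | some q => (q.2.length : Int)

def rel (st : Int × Option Int) (b : Option (Int × List Int)) : Prop :=
  st.2 = b.map Prod.fst ∧ st.1 = bVal b ∧ ∀ q, b = some q → 0 < q.2.length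

theorem step_rel (sel cov : List Int) (st : Int × Option Int) (b : Option (Int × List Int))
    (p : Int × List Int) (h : rel st b) : rel (stepA sel cov st p) (stepB sel cov b p) := by
  obtain ⟨h1, h2, h3⟩ := h
  rw [stepA, stepB]
  by_cases hs : sel.contains p.1 = false
  · rw [if_pos hs, if_pos hs]
    cases b with
    | none =>
      have h2 : st.1 = 0 := h2
      by_cases hc : 0 < (PySem.Set.diff p.2 cov).length
      · have hcI : (0 : Int) < ((PySem.Set.diff p.2 cov).length : Int) := by exact_mod_cast hc
        have hgt : ((PySem.Set.diff p.2 cov).length : Int) > st.1 := by omega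
        rw [if_pos hgt]
        rw [show bCond none (p.1, PySem.Set.diff p.2 cov) = true by simp [bCond, hc]]
        exact ⟨rfl, rfl, by rintro q ⟨rfl⟩; exact hc⟩
      · have hc0 : (PySem.Set.diff p.2 cov).length = 0 := by omega
        have hgt : ¬ ((PySem.Set.diff p.2 cov).length : Int) > st.1 := by
          rw [h2, hc0]; simp
        rw [if_neg hgt]
        rw [show bCond none (p.1, PySem.Set.diff p.2 cov) = false by simp [bCond, hc0]]
        exact ⟨h1, h2, h3⟩
    | some q =>
      have h2 : st.1 = (q.2.length : Int) := h2
      have hq : 0 < q.2.length := h3 q rfl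
      by_cases hc : q.2.length < (PySem.Set.diff p.2 cov).length
      · have hcI : ((q.2.length : Int)) < ((PySem.Set.diff p.2 cov).length : Int) := by exact_mod_cast hc
        have hgt : ((PySem.Set.diff p.2 cov).length : Int) > st.1 := by omega
        rw [if_pos hgt]
        rw [show bCond (some q) (p.1, PySem.Set.diff p.2 cov) = true by
          simp [bCond, hc, Nat.lt_trans hq hc]]
        exact ⟨rfl, rfl, by rintro r ⟨rfl⟩; exact Nat.lt_trans hq hc⟩
      · have hcI : ((PySem.Set.diff p.2 cov).length : Int) ≤ ((q.2.length : Int)) := by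
          exact_mod_cast Nat.not_lt.mp hc
        have hgt : ¬ ((PySem.Set.diff p.2 cov).length : Int) > st.1 := by omega
        rw [if_neg hgt]
        rw [show bCond (some q) (p.1, PySem.Set.diff p.2 cov) = false by simp [bCond, hc]]
        exact ⟨h1, h2, h3⟩
  · rw [if_neg hs, if_neg hs]
    exact ⟨h1, h2, h3⟩

theorem fold_rel (sel cov : List Int) (l : List (Int × List Int)) (st : Int × Option Int)
    (b : Option (Int × List Int)) (h : rel st b) :
    rel (l.foldl (stepA sel cov) st) (l.foldl (stepB sel cov) b) := by
  induction l generalizing st b with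
  | nil => exact h
  | cons p t ih => exact ih _ _ (step_rel sel cov st b p h)

theorem bBest_eq_fold_stepB (towers : List (List Int)) (sel cov : List Int) :
    bBest (remOf towers sel cov) = (PySem.List.enumerate towers).foldl (stepB sel cov) none := by
  rw [bBest, remOf, List.foldl_map, List.foldl_filter]
  apply List.foldl_ext
  intro acc x _
  rw [stepB]
  by_cases hs : sel.contains x.1 = false
  · rw [if_pos hs, hs]
    simp
  · rw [if_neg hs]
    simp only [Bool.not_eq_false] at hs
    rw [hs]
    simp

theorem inner_agree (towers : List (List Int)) (sel cov : List Int) :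
    rel (aBest sel cov towers) (bBest (remOf towers sel cov)) := by
  rw [bBest_eq_fold_stepB]
  rw [show aBest sel cov towers = (PySem.List.enumerate towers).foldl (stepA sel cov) (0, none) from rfl]
  exact fold_rel sel cov _ _ _ ⟨rfl, rfl, by simp⟩

-- if no tower adds coverage, A's state is a fixed point of every later round
theorem aIter_fixed (towers : List (List Int)) (m : Nat) (st : List Int × List Int)
    (h : (aBest st.1 st.2 towers).2 = none) : aIter towers m st = st := by
  induction m with
  | zero => rfl
  | succ m ih => simp [aIter, aStep, h, ih]

-- adding elements already absorbed by cov does not change a union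
theorem foldl_add_filter (cov : List Int) (t acc : List Int)
    (h : ∀ x : Int, cov.contains x = true → acc.contains x = true) :
    (t.filter (fun x => !cov.contains x)).foldl PySem.Set.add acc = t.foldl PySem.Set.add acc := by
  induction t generalizing acc with
  | nil => rfl
  | cons x t ih =>
    by_cases hx : cov.contains x = true
    · have hax : x ∈ acc := by simpa using h x hx
      simp only [List.filter_cons, hx, Bool.not_true, List.foldl_cons]
      rw [PySem.Set.add_of_mem hax]
      exact ih acc h
    · simp only [List.filter_cons, hx, Bool.not_false, List.foldl_cons]
      refine ih (PySem.Set.add acc x) ?_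
      intro y hy
      have : y ∈ acc := by simpa using h y hy
      simp [PySem.Set.add_eq_ite]
      split_ifs <;> simp_all
theorem union_diff_absorb (cov t : List Int) :
    PySem.Set.union cov (PySem.Set.diff t cov) = PySem.Set.union cov t := by
  show (PySem.Set.diff t cov).foldl PySem.Set.add cov = t.foldl PySem.Set.add cov
  exact foldl_add_filter cov t cov (fun x hx => hx)

-- contains distributes over a set union
theorem contains_union (cov t : List Int) (x : Int) :
    (PySem.Set.union cov t).contains x = (cov.contains x || t.contains x) := by
  by_cases hx : x ∈ PySem.Set.union cov t
  · have hm := (PySem.Set.mem_union (s := cov) (t := t) (y := x)).mp hx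
    simp only [List.contains_eq_mem]
    simp_all
  · have hnx := hx
    rw [PySem.Set.mem_union] at hnx
    push_neg at hnx
    simp only [List.contains_eq_mem]
    simp_all

-- set difference against a union is two successive differences
theorem diff_union (s cov t : List Int) :
    PySem.Set.diff s (PySem.Set.union cov t) = PySem.Set.diff (PySem.Set.diff s cov) t := by
  simp only [PySem.Set.diff, List.filter_filter]
  apply List.filter_congr
  intro x _
  rw [contains_union]
  simp [PySem.Set.contains, Bool.not_or, Bool.and_comm]

-- selecting tower q updates remOf exactly as bShrink does
theorem remOf_step (towers : List (List Int)) (sel cov : List Int) (q : Int × List Int) :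
    remOf towers (sel ++ [q.1]) (PySem.Set.union cov q.2) = bShrink (remOf towers sel cov) q.1 q.2 := by
  rw [remOf, remOf]
  generalize PySem.List.enumerate towers = l
  induction l with
  | nil => rfl
  | cons p t ih =>
    simp only [bShrink] at ih ⊢
    by_cases hs : p.1 ∈ sel <;> by_cases hb : p.1 = q.1 <;>
      simp_all [List.filter_cons, List.filter_map, List.map_map, bne, diff_union,
        List.contains_append, List.contains_cons, Function.comp]

-- members of remOf name real towers
theorem remOf_elem (towers : List (List Int)) (sel cov : List Int) (q : Int × List Int)
    (h : q ∈ remOf towers sel cov) :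
    ∃ t, (q.1, t) ∈ PySem.List.enumerate towers ∧ q.2 = PySem.Set.diff t cov := by
  rw [remOf] at h
  obtain ⟨p, hp, hq⟩ := List.mem_map.mp h
  exact ⟨p.2, by rw [← hq] at *; exact (List.mem_filter.mp hp).1, by rw [← hq]⟩

theorem enumerate_getD (towers : List (List Int)) (i : Int) (t : List Int)
    (h : (i, t) ∈ PySem.List.enumerate towers) : PySem.List.pyGetD towers i [] = t := by
  rw [PySem.List.mem_enumerate_iff] at h
  obtain ⟨j, hj, hp⟩ := h
  rw [Prod.ext_iff] at hp
  obtain ⟨h1, h2⟩ := hp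
  simp only at h1 h2
  rw [h1, h2]
  rw [show (0 : Int) + (j : Int) = (j : Int) by ring, PySem.List.pyGetD_natCast]
  simp [hj, List.getD_eq_getElem?_getD]

-- the main simulation: m remaining rounds of A equal bGo on the corresponding state
theorem main_sim (towers : List (List Int)) (m : Nat) :
    ∀ (sel cov : List Int) (n : Int), n.toNat = m →
      aIter towers m (sel, cov) = bGo (remOf towers sel cov) sel cov n := by
  induction m with
  | zero =>
    intro sel cov n hn
    have h0 : ¬ 0 < n := by omega
    rw [bGo, if_neg h0]
    rfl
  | succ m ih =>
    intro sel cov n hn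
    have h0 : 0 < n := by omega
    obtain ⟨hfst, -, -⟩ := inner_agree towers sel cov
    rw [bGo, if_pos h0]
    cases hb : bBest (remOf towers sel cov) with
    | none =>
      have ha : (aBest sel cov towers).2 = none := by rw [hfst, hb]; rfl
      exact aIter_fixed towers (m + 1) (sel, cov) ha
    | some q =>
      have ha : (aBest sel cov towers).2 = some q.1 := by rw [hfst, hb]; rfl
      obtain ⟨t, ht, hq2⟩ := remOf_elem towers sel cov q (bBest_mem hb)
      have hstep : aStep towers (sel, cov) = (sel ++ [q.1], PySem.Set.union cov q.2) := by
        rw [aStep]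
        simp only [ha]
        rw [enumerate_getD towers q.1 t ht, hq2, union_diff_absorb]
      show aIter towers m (aStep towers (sel, cov)) = _
      rw [hstep, ih (sel ++ [q.1]) (PySem.Set.union cov q.2) (n - 1) (by omega),
        remOf_step]

theorem remOf_init (towers : List (List Int)) : remOf towers [] [] = PySem.List.enumerate towers := by
  rw [remOf]
  simp [PySem.Set.diff]

-- ===== VERDICT (by name: the statement is the Claim_ definition above) =====
theorem max_coverage_spec : Claim_equal_max_coverage := by
  intro towers users k _
  show max_coverage towers users k = max_coverage_alt towers users k
  rw [max_coverage, max_coverage_alt]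
  have : (PySem.List.pyRange 0 k 1).foldl
      (fun (st : List Int × List Int) _ =>
        match (aBest st.1 st.2 towers).2 with
        | some b => (st.1 ++ [b], PySem.Set.union st.2 (PySem.List.pyGetD towers b []))
        | none => st) ([], []) =
      (PySem.List.pyRange 0 k 1).foldl (fun st _ => aStep towers st) ([], []) := rfl
  rw [this, foldl_const_eq_aIter, length_pyRange_zero,
    main_sim towers k.toNat [] [] k rfl, remOf_init]
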